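-- pv_equiv track=rewrite | github.com/hoe-ze-il/Python-Algorithm | Online_Judge/Goldbach_Conjecture.py | count_goldbach_triangles
-- ===== SOURCE A (Python) =====
-- def count_goldbach_triangles(odd_numbers, prime_list):
--     cnt = 0
--     for a in range(1, odd_numbers - 1):
--         if a in prime_list:
--             for b in range(a, odd_numbers - 1):
--                 if b in prime_list:
--                     c = odd_numbers - a - b
--                     if c in prime_list:
--                         if b <= c and a + b > c:
--                             cnt += 1
--     return cnt
-- ===== SOURCE B (Python) =====
-- def count_goldbach_triangles(odd_numbers, prime_list):
--     # Enumerate by the largest side c: a triangle triple a <= b <= c with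
--     # a+b+c = odd_numbers and a+b > c exists exactly when 2*c < odd_numbers,
--     # so count Goldbach partitions a + b = odd_numbers - c with a <= b <= c.
--     small = sorted({p for p in prime_list if 1 <= p <= odd_numbers - 2})
--     small_set = set(small)
--     cnt = 0
--     for c in small:
--         if 2 * c < odd_numbers:
--             m = odd_numbers - c
--             for a in small:
--                 if 2 * a <= m and (m - a) in small_set and (m - a) <= c:
--                     cnt += 1
--     return cnt
-- ===== Notes on version B (the rewrite author's own statement) =====
-- stated objective: faster
-- what changed: B enumerates triples by their largest side c over a sorted de-duplicated list of the primes in [1, odd_numbers-2] (the triangle inequality collapses to 2*c < odd_numbers) and for each such c counts Goldbach partitions a + b = odd_numbers - c with prime a <= b <= c via a set lookup for b = (odd_numbers-c)-a, instead of scanning every integer in range(1, odd_numbers-1) twice with linear list-membership tests for a, b and c.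
import Mathlib
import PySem

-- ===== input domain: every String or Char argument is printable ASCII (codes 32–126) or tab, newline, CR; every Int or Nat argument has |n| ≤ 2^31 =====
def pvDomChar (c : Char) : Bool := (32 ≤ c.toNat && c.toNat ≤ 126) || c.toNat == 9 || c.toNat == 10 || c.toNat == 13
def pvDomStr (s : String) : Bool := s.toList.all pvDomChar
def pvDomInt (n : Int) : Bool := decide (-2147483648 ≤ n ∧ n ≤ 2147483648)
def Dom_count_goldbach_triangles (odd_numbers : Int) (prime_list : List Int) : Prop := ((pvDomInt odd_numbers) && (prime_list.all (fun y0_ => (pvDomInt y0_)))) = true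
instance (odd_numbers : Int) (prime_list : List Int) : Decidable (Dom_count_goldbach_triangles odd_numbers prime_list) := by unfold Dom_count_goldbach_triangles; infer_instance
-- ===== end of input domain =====

-- B enumerates triples by their largest side c over the sorted de-duplicated primes in
-- [1, odd_numbers-2] (the triangle inequality collapses to 2*c < odd_numbers) and counts
-- Goldbach partitions a + b = odd_numbers - c with a ≤ b ≤ c via a set lookup for b;
-- same return value, different (faster) algorithm.

-- ===== PORT A =====
def count_goldbach_triangles (odd_numbers : Int) (prime_list : List Int) : Int :=
  (PySem.List.pyRange 1 (odd_numbers - 1) 1).foldl (fun cnt a =>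
    if a ∈ prime_list then
      (PySem.List.pyRange a (odd_numbers - 1) 1).foldl (fun cnt b =>
        if b ∈ prime_list then
          let c := odd_numbers - a - b
          if c ∈ prime_list then
            if b ≤ c ∧ a + b > c then cnt + 1 else cnt
          else cnt
        else cnt) cnt
    else cnt) 0

-- ===== PORT B =====
def count_goldbach_triangles_alt (odd_numbers : Int) (prime_list : List Int) : Int :=
  let small : List Int :=
    PySem.List.sorted
      (PySem.Set.ofList (prime_list.filter (fun p => decide (1 ≤ p ∧ p ≤ odd_numbers - 2))))
      (fun x => x) false
  let smallSet : PySem.Set Int := PySem.Set.ofList small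
  small.foldl (fun cnt c =>
    if 2 * c < odd_numbers then
      let m := odd_numbers - c
      small.foldl (fun cnt a =>
        if 2 * a ≤ m ∧ PySem.Set.contains smallSet (m - a) ∧ m - a ≤ c then cnt + 1 else cnt) cnt
    else cnt) 0

-- ===== PRECONDITION & SPEC =====
def Spec_count_goldbach_triangles (odd_numbers : Int) (prime_list : List Int) (out : Int) : Prop := out = count_goldbach_triangles_alt odd_numbers prime_list
instance (odd_numbers : Int) (prime_list : List Int) (out : Int) : Decidable (Spec_count_goldbach_triangles odd_numbers prime_list out) := by unfold Spec_count_goldbach_triangles; infer_instance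

-- ===== CLAIM (what is proved, stated in full; the proofs are below) =====
def Claim_equal_count_goldbach_triangles : Prop := ∀ (odd_numbers : Int) (prime_list : List Int), Dom_count_goldbach_triangles odd_numbers prime_list → Spec_count_goldbach_triangles odd_numbers prime_list (count_goldbach_triangles odd_numbers prime_list)

-- ===== LEMMAS AND PROOFS =====

-- the common search box [1, n-2] × [1, n-2]
noncomputable def pvBoxP (n : Int) : Finset (Int × Int) := (Finset.Icc 1 (n-2)) ×ˢ (Finset.Icc 1 (n-2))

-- the set of pairs A counts: p = (a, b)
abbrev pvPA (n : Int) (pl : List Int) (p : Int × Int) : Prop :=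
  p.1 ∈ pl ∧ p.1 ≤ p.2 ∧ p.2 ∈ pl ∧ (n - p.1 - p.2) ∈ pl ∧
    p.2 ≤ n - p.1 - p.2 ∧ p.1 + p.2 > n - p.1 - p.2

-- the set of pairs B counts: p = (c, a)
abbrev pvPB (n : Int) (pl : List Int) (p : Int × Int) : Prop :=
  p.1 ∈ pl ∧ 2 * p.1 < n ∧ p.2 ∈ pl ∧ 2 * p.2 ≤ n - p.1 ∧
    ((n - p.1 - p.2) ∈ pl ∧ 1 ≤ n - p.1 - p.2 ∧ n - p.1 - p.2 ≤ n - 2) ∧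
    n - p.1 - p.2 ≤ p.1

-- inner indicators
def pvIA (n : Int) (pl : List Int) (a b : Int) : Int :=
  if b ∈ pl ∧ (n - a - b) ∈ pl ∧ b ≤ n - a - b ∧ a + b > n - a - b then 1 else 0

def pvIB (n : Int) (pl : List Int) (c a : Int) : Int :=
  if 2 * a ≤ n - c ∧ ((n - c - a) ∈ pl ∧ 1 ≤ n - c - a ∧ n - c - a ≤ n - 2) ∧ n - c - a ≤ c
  then 1 else 0

def pvSmall (n : Int) (pl : List Int) : List Int :=
  PySem.List.sorted
    (PySem.Set.ofList (pl.filter (fun p => decide (1 ≤ p ∧ p ≤ n - 2))))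
    (fun x => x) false

theorem pvSmall_nodup (n : Int) (pl : List Int) : (pvSmall n pl).Nodup :=
  (PySem.List.sorted_ofList_pairwise_lt _).imp (fun h => ne_of_lt h)

theorem pvMem_small (n : Int) (pl : List Int) (x : Int) :
    x ∈ pvSmall n pl ↔ x ∈ pl ∧ 1 ≤ x ∧ x ≤ n - 2 := by
  unfold pvSmall
  rw [PySem.List.mem_sorted, PySem.Set.mem_ofList, List.mem_filter]
  simp

theorem pvSum_map_toFinset {l : List Int} (h : l.Nodup) (f : Int → Int) :
    (l.map f).sum = ∑ x ∈ l.toFinset, f x := by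
  induction l with
  | nil => simp
  | cons a t ih =>
    rw [List.nodup_cons] at h
    rw [List.map_cons, List.sum_cons, List.toFinset_cons,
      Finset.sum_insert (by simp [h.1]), ih h.2]

theorem pvA_card (n : Int) (pl : List Int) :
    count_goldbach_triangles n pl = (((pvBoxP n).filter (pvPA n pl)).card : Int) := by
  unfold count_goldbach_triangles
  have hout : (fun (cnt a : Int) =>
      if a ∈ pl then
        (PySem.List.pyRange a (n - 1) 1).foldl (fun cnt b =>
          if b ∈ pl then
            let c := n - a - b
            if c ∈ pl then
              if b ≤ c ∧ a + b > c then cnt + 1 else cnt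
            else cnt
          else cnt) cnt
      else cnt) = (fun cnt a => cnt +
        (if a ∈ pl then ((PySem.List.pyRange a (n-1) 1).map (pvIA n pl a)).sum else 0)) := by
    funext cnt a
    by_cases ha : a ∈ pl
    · simp only [ha, if_true]
      have hbody : (fun (cnt b : Int) =>
          if b ∈ pl then
            let c := n - a - b
            if c ∈ pl then
              if b ≤ c ∧ a + b > c then cnt + 1 else cnt
            else cnt
          else cnt) = (fun cnt b => cnt + pvIA n pl a b) := by
        funext cnt b
        by_cases h1 : b ∈ pl <;> by_cases h2 : (n - a - b) ∈ pl <;>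
          by_cases h3 : b ≤ n - a - b ∧ a + b > n - a - b <;>
            simp [pvIA, h1, h2, h3]
      rw [hbody, PySem.List.foldl_add]
    · simp [ha]
  rw [hout, PySem.List.foldl_add]
  rw [pvSum_map_toFinset (PySem.List.nodup_pyRange_one _ _)]
  have hICC : (PySem.List.pyRange 1 (n-1) 1).toFinset = Finset.Icc 1 (n-2) := by
    ext x; simp [PySem.List.mem_pyRange_one, Finset.mem_Icc]; omega
  rw [hICC]
  have hstep : ∀ a ∈ Finset.Icc (1:Int) (n-2),
      (if a ∈ pl then ((PySem.List.pyRange a (n-1) 1).map (pvIA n pl a)).sum else 0) =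
        ∑ b ∈ Finset.Icc (1:Int) (n-2), if pvPA n pl (a, b) then 1 else 0 := by
    intro a ha
    rw [Finset.mem_Icc] at ha
    by_cases hpa : a ∈ pl
    · simp only [hpa, if_true]
      rw [pvSum_map_toFinset (PySem.List.nodup_pyRange_one _ _)]
      have hI : (PySem.List.pyRange a (n-1) 1).toFinset =
          (Finset.Icc (1:Int) (n-2)).filter (fun b => a ≤ b) := by
        ext x
        simp [PySem.List.mem_pyRange_one, Finset.mem_Icc, Finset.mem_filter]
        omega
      rw [hI, Finset.sum_filter]
      refine Finset.sum_congr rfl (fun b hb => ?_)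
      rw [Finset.mem_Icc] at hb
      by_cases hab : a ≤ b
      · simp only [hab, if_true, pvIA, pvPA, hpa, true_and]
      · simp [pvPA, hab]
    · simp only [hpa, if_false]
      symm
      refine Finset.sum_eq_zero (fun b hb => ?_)
      simp [pvPA, hpa]
  rw [Finset.sum_congr rfl hstep]
  rw [← Finset.sum_product']
  rw [Finset.sum_boole]
  simp [pvBoxP]

theorem pvB_card (n : Int) (pl : List Int) :
    count_goldbach_triangles_alt n pl = (((pvBoxP n).filter (pvPB n pl)).card : Int) := by
  have halt : count_goldbach_triangles_alt n pl =
      (pvSmall n pl).foldl (fun cnt c =>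
        if 2 * c < n then
          (pvSmall n pl).foldl (fun cnt a =>
            if 2 * a ≤ n - c ∧
                PySem.Set.contains (PySem.Set.ofList (pvSmall n pl)) (n - c - a) = true ∧
                n - c - a ≤ c
            then cnt + 1 else cnt) cnt
        else cnt) 0 := rfl
  rw [halt]
  have hout : (fun (cnt c : Int) =>
      if 2 * c < n then
        (pvSmall n pl).foldl (fun cnt a =>
          if 2 * a ≤ n - c ∧
              PySem.Set.contains (PySem.Set.ofList (pvSmall n pl)) (n - c - a) = true ∧
              n - c - a ≤ c
          then cnt + 1 else cnt) cnt
      else cnt) = (fun cnt c => cnt +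
        (if 2 * c < n then ((pvSmall n pl).map (pvIB n pl c)).sum else 0)) := by
    funext cnt c
    by_cases hc : 2 * c < n
    · simp only [hc, if_true]
      have hbody : (fun (cnt a : Int) =>
          if 2 * a ≤ n - c ∧
              PySem.Set.contains (PySem.Set.ofList (pvSmall n pl)) (n - c - a) = true ∧
              n - c - a ≤ c
          then cnt + 1 else cnt) = (fun cnt a => cnt + pvIB n pl c a) := by
        funext cnt a
        have hmem : (PySem.Set.contains (PySem.Set.ofList (pvSmall n pl)) (n - c - a) = true) ↔
            ((n - c - a) ∈ pl ∧ 1 ≤ n - c - a ∧ n - c - a ≤ n - 2) := by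
          rw [PySem.Set.contains_iff, PySem.Set.mem_ofList, pvMem_small]
        have hCC : (2 * a ≤ n - c ∧
              PySem.Set.contains (PySem.Set.ofList (pvSmall n pl)) (n - c - a) = true ∧
              n - c - a ≤ c) ↔
            (2 * a ≤ n - c ∧ ((n - c - a) ∈ pl ∧ 1 ≤ n - c - a ∧ n - c - a ≤ n - 2) ∧
              n - c - a ≤ c) := by
          rw [hmem]
        by_cases h : 2 * a ≤ n - c ∧ ((n - c - a) ∈ pl ∧ 1 ≤ n - c - a ∧ n - c - a ≤ n - 2) ∧
            n - c - a ≤ c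
        · rw [if_pos (hCC.mpr h), pvIB, if_pos h]
        · rw [if_neg (fun hx => h (hCC.mp hx)), pvIB, if_neg h]
          simp
      rw [hbody, PySem.List.foldl_add]
    · simp [hc]
  rw [hout, PySem.List.foldl_add]
  rw [pvSum_map_toFinset (pvSmall_nodup n pl)]
  have hS : (pvSmall n pl).toFinset =
      (Finset.Icc (1:Int) (n-2)).filter (fun x => x ∈ pl) := by
    ext x
    simp [pvMem_small, Finset.mem_Icc, Finset.mem_filter]
    tauto
  rw [hS, Finset.sum_filter]
  have hstep : ∀ c ∈ Finset.Icc (1:Int) (n-2),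
      (if c ∈ pl then (if 2 * c < n then ((pvSmall n pl).map (pvIB n pl c)).sum else 0) else 0) =
        ∑ a ∈ Finset.Icc (1:Int) (n-2), if pvPB n pl (c, a) then 1 else 0 := by
    intro c hc
    by_cases hcpl : c ∈ pl
    · by_cases h2c : 2 * c < n
      · simp only [hcpl, h2c, if_true]
        rw [pvSum_map_toFinset (pvSmall_nodup n pl), hS, Finset.sum_filter]
        refine Finset.sum_congr rfl (fun a ha => ?_)
        by_cases hapl : a ∈ pl
        · simp only [hapl, if_true, pvIB, pvPB, hcpl, h2c, true_and]
        · simp [pvPB, hapl]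
      · simp only [hcpl, h2c, if_true, if_false]
        symm
        refine Finset.sum_eq_zero (fun a ha => ?_)
        simp [pvPB, h2c]
    · simp only [hcpl, if_false]
      symm
      refine Finset.sum_eq_zero (fun a ha => ?_)
      simp [pvPB, hcpl]
  rw [Finset.sum_congr rfl hstep]
  rw [← Finset.sum_product']
  rw [Finset.sum_boole]
  simp [pvBoxP]

-- the bijection (a, b) ↦ (c, a) with c = n - a - b between the two counted sets
theorem pvCard_eq (n : Int) (pl : List Int) :
    ((pvBoxP n).filter (pvPA n pl)).card = ((pvBoxP n).filter (pvPB n pl)).card := by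
  apply Finset.card_nbij' (fun p => (n - p.1 - p.2, p.1)) (fun p => (p.2, n - p.1 - p.2))
  · rintro ⟨a, b⟩ hp
    simp only [Finset.coe_filter, Set.mem_setOf_eq, pvBoxP, Finset.mem_product,
      Finset.mem_Icc, pvPA, pvPB] at hp ⊢
    obtain ⟨⟨⟨ha1, ha2⟩, hb1, hb2⟩, hapl, hab, hbpl, hcpl, hbc, htri⟩ := hp
    refine ⟨⟨⟨by omega, by omega⟩, by omega, by omega⟩,
      hcpl, by omega, hapl, by omega, ⟨?_, by omega, by omega⟩, by omega⟩
    have : n - (n - a - b) - a = b := by ring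
    rw [this]; exact hbpl
  · rintro ⟨c, a⟩ hp
    simp only [Finset.coe_filter, Set.mem_setOf_eq, pvBoxP, Finset.mem_product,
      Finset.mem_Icc, pvPA, pvPB] at hp ⊢
    obtain ⟨⟨⟨hc1, hc2⟩, ha1, ha2⟩, hcpl, h2c, hapl, h2a, ⟨hbpl, hb1, hb2⟩, hbc⟩ := hp
    refine ⟨⟨⟨by omega, by omega⟩, by omega, by omega⟩,
      hapl, by omega, hbpl, ?_, by omega, by omega⟩
    have : n - a - (n - c - a) = c := by ring
    rw [this]; exact hcpl
  · rintro ⟨a, b⟩ hp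
    simp only [Prod.mk.injEq]
    exact ⟨trivial, by omega⟩
  · rintro ⟨c, a⟩ hp
    simp only [Prod.mk.injEq]
    exact ⟨by omega, trivial⟩

-- ===== VERDICT (by name: the statement is the Claim_ definition above) =====
theorem count_goldbach_triangles_spec : Claim_equal_count_goldbach_triangles := by
  intro n pl _
  unfold Spec_count_goldbach_triangles
  rw [pvA_card, pvB_card, pvCard_eq]
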